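-- pv_equiv track=rewrite | github.com/papalozarou/pyiclodoc-photos | app/scheduler.py | parse_weekday_list
-- ===== SOURCE A (Python) =====
-- WEEKDAY_MAP = {
--     "monday": 0,
--     "tuesday": 1,
--     "wednesday": 2,
--     "thursday": 3,
--     "friday": 4,
--     "saturday": 5,
--     "sunday": 6,
-- }
--
-- def parse_weekday(VALUE: str) -> int | None:
--     return WEEKDAY_MAP.get(VALUE.strip().lower())
--
-- def parse_weekday_list(VALUE: str, EXPECTED_COUNT: int) -> list[int] | None:
--     PARTS = [ITEM.strip().lower() for ITEM in VALUE.split(",") if ITEM.strip()]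
--
--     if len(PARTS) != EXPECTED_COUNT:
--         return None
--
--     INDICES = [parse_weekday(PART) for PART in PARTS]
--
--     if any(INDEX is None for INDEX in INDICES):
--         return None
--
--     DISTINCT = {INDEX for INDEX in INDICES if INDEX is not None}
--
--     if len(DISTINCT) != EXPECTED_COUNT:
--         return None
--
--     return [INDEX for INDEX in INDICES if INDEX is not None]
-- ===== SOURCE B (Python) =====
-- WEEKDAY_MAP = {
--     "monday": 0,
--     "tuesday": 1,
--     "wednesday": 2,
--     "thursday": 3,
--     "friday": 4,
--     "saturday": 5,
--     "sunday": 6,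
-- }
--
-- def parse_weekday_list(VALUE, EXPECTED_COUNT):
--     seen = set()
--     result = []
--     for ITEM in VALUE.split(","):
--         KEY = ITEM.strip().lower()
--         if not KEY:
--             continue
--         IDX = WEEKDAY_MAP.get(KEY)
--         if IDX is None or IDX in seen:
--             return None
--         seen.add(IDX)
--         result.append(IDX)
--     return result if len(result) == EXPECTED_COUNT else None
-- ===== Notes on version B (the rewrite author's own statement) =====
-- stated objective: simpler
-- what changed: Replaces A's four separate scans (count check, map to indices, any-None check, distinct-set build, final rebuild) with one early-exiting pass that maintains a seen-set and the result list, checking the count once at the end.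
import Mathlib
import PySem

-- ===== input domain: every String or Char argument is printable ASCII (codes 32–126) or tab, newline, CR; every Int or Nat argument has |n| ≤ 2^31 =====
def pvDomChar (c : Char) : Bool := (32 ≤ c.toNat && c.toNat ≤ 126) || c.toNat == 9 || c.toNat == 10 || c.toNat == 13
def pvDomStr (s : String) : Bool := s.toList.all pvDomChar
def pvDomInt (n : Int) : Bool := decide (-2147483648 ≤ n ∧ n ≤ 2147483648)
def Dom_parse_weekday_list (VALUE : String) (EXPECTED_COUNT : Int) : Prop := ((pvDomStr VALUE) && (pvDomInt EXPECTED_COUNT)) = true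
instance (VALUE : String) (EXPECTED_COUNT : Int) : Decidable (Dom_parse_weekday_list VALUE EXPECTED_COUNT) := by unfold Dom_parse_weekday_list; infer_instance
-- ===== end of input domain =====

-- B replaces A's four separate scans with one early-exiting pass over the split items
-- that maintains a seen-set and the result list, checking the count once at the end (objective: simpler).


-- ===== PORT A =====
def WEEKDAY_MAP : PySem.Dict String Int := PySem.Dict.ofList
  [("monday", 0), ("tuesday", 1), ("wednesday", 2), ("thursday", 3),
   ("friday", 4), ("saturday", 5), ("sunday", 6)]

def parse_weekday (VALUE : String) : Option Int :=
  WEEKDAY_MAP.get? (PySem.Str.lower (PySem.Str.strip VALUE))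

def parse_weekday_list (VALUE : String) (EXPECTED_COUNT : Int) : Option (List Int) :=
  let PARTS : List String :=
    (((PySem.Str.split? VALUE ",").getD []).filter
        (fun ITEM => !(PySem.Str.strip ITEM == ""))).map
      (fun ITEM => PySem.Str.lower (PySem.Str.strip ITEM))
  if (PARTS.length : Int) ≠ EXPECTED_COUNT then none
  else
    let INDICES : List (Option Int) := PARTS.map parse_weekday
    if INDICES.any (fun INDEX => INDEX.isNone) then none
    else
      let DISTINCT : PySem.Set Int := PySem.Set.ofList (INDICES.filterMap id)
      if (DISTINCT.length : Int) ≠ EXPECTED_COUNT then none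
      else some (INDICES.filterMap id)

-- ===== PORT B =====
-- the single early-exiting pass of Source B: seen-set + result accumulator, None on unknown or repeated key
def pvAltLoop : List String → PySem.Set Int → List Int → Option (List Int)
  | [], _, result => some result
  | ITEM :: rest, seen, result =>
    let KEY := PySem.Str.lower (PySem.Str.strip ITEM)
    if KEY == "" then pvAltLoop rest seen result
    else
      match WEEKDAY_MAP.get? KEY with
      | none => none
      | some IDX =>
        if PySem.Set.contains seen IDX then none
        else pvAltLoop rest (PySem.Set.add seen IDX) (result ++ [IDX])

def parse_weekday_list_alt (VALUE : String) (EXPECTED_COUNT : Int) : Option (List Int) :=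
  match pvAltLoop ((PySem.Str.split? VALUE ",").getD []) PySem.Set.empty [] with
  | none => none
  | some result => if (result.length : Int) == EXPECTED_COUNT then some result else none

-- ===== PRECONDITION & SPEC =====
def Spec_parse_weekday_list (VALUE : String) (EXPECTED_COUNT : Int) (out : Option (List Int)) : Prop := out = parse_weekday_list_alt VALUE EXPECTED_COUNT
instance (VALUE : String) (EXPECTED_COUNT : Int) (out : Option (List Int)) : Decidable (Spec_parse_weekday_list VALUE EXPECTED_COUNT out) := by unfold Spec_parse_weekday_list; infer_instance

-- ===== CLAIM (what is proved, stated in full; the proofs are below) =====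
def Claim_equal_parse_weekday_list : Prop := ∀ (VALUE : String) (EXPECTED_COUNT : Int), Dom_parse_weekday_list VALUE EXPECTED_COUNT → Spec_parse_weekday_list VALUE EXPECTED_COUNT (parse_weekday_list VALUE EXPECTED_COUNT)

-- ===== LEMMAS AND PROOFS =====

-- `lowerChar` preserves whitespace-ness
theorem pv_isspace_lowerChar (c : Char) :
    PySem.Chars.isspace (PySem.Chars.lowerChar c) = PySem.Chars.isspace c := by
  unfold PySem.Chars.lowerChar
  split_ifs with h
  · have hb : 'A' ≤ c ∧ c ≤ 'Z' := by
      simpa [PySem.Chars.isupper] using h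
    have h1 : 65 ≤ c.toNat := hb.1
    have h2 : c.toNat ≤ 90 := hb.2
    have hv : (c.toNat + 32).isValidChar := by left; omega
    have ht : (Char.ofNat (c.toNat + 32)).toNat = c.toNat + 32 := by
      rw [Char.toNat_ofNat]; simp [hv]
    rw [Bool.eq_iff_iff]
    simp only [PySem.Chars.isspace, ht, Bool.or_eq_true, Bool.and_eq_true, decide_eq_true_eq]
    omega
  · rfl

theorem pv_lowerChar_idem (c : Char) :
    PySem.Chars.lowerChar (PySem.Chars.lowerChar c) = PySem.Chars.lowerChar c := by
  unfold PySem.Chars.lowerChar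
  split_ifs with h h2
  · exfalso
    have hb : 'A' ≤ c ∧ c ≤ 'Z' := by simpa [PySem.Chars.isupper] using h
    have h1 : 65 ≤ c.toNat := hb.1
    have h2' : c.toNat ≤ 90 := hb.2
    have hv : (c.toNat + 32).isValidChar := by left; omega
    have ht : (Char.ofNat (c.toNat + 32)).toNat = c.toNat + 32 := by
      rw [Char.toNat_ofNat]; simp [hv]
    have := (by simpa [PySem.Chars.isupper] using h2 : 'A' ≤ Char.ofNat (c.toNat + 32) ∧ Char.ofNat (c.toNat + 32) ≤ 'Z')
    have ha : 65 ≤ (Char.ofNat (c.toNat + 32)).toNat := this.1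
    have hb' : (Char.ofNat (c.toNat + 32)).toNat ≤ 90 := this.2
    omega
  · rfl
  · rfl

theorem pv_rstrip_idem (m : List Char) :
    PySem.Chars.rstrip (PySem.Chars.rstrip m) = PySem.Chars.rstrip m := by
  simp [PySem.Chars.rstrip, List.dropWhile_idempotent]

theorem pv_strip_idem (l : List Char) :
    PySem.Chars.strip (PySem.Chars.strip l) = PySem.Chars.strip l := by
  unfold PySem.Chars.strip
  set m := PySem.Chars.lstrip l with hm
  have hmm : PySem.Chars.lstrip m = m := by
    simp [PySem.Chars.lstrip, hm, List.dropWhile_idempotent]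
  have hpre : PySem.Chars.rstrip m <+: m := by
    simpa [PySem.Chars.rstrip] using List.reverse_prefix.mpr (List.dropWhile_suffix (l := m.reverse) PySem.Chars.isspace)
  have hL : PySem.Chars.lstrip (PySem.Chars.rstrip m) = PySem.Chars.rstrip m := by
    unfold PySem.Chars.lstrip
    rw [List.dropWhile_eq_self_iff]
    intro hl
    have h0 := List.IsPrefix.getElem hpre (i := 0) hl
    rw [h0]
    have h2 := List.dropWhile_eq_self_iff.mp (by simpa [PySem.Chars.lstrip] using hmm)
    exact h2 (lt_of_lt_of_le hl hpre.length_le)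
  rw [hL, pv_rstrip_idem]

theorem pv_lower_idem (l : List Char) :
    PySem.Chars.lower (PySem.Chars.lower l) = PySem.Chars.lower l := by
  simp [PySem.Chars.lower, List.map_map, Function.comp_def, pv_lowerChar_idem]

theorem pv_strip_lower (l : List Char) :
    PySem.Chars.strip (PySem.Chars.lower l) = PySem.Chars.lower (PySem.Chars.strip l) := by
  have hds : ∀ m : List Char, List.dropWhile PySem.Chars.isspace (List.map PySem.Chars.lowerChar m)
      = List.map PySem.Chars.lowerChar (List.dropWhile PySem.Chars.isspace m) := by
    intro m
    rw [List.dropWhile_map]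
    have hc : (PySem.Chars.isspace ∘ PySem.Chars.lowerChar) = PySem.Chars.isspace :=
      funext pv_isspace_lowerChar
    rw [hc]
  simp only [PySem.Chars.strip, PySem.Chars.lstrip, PySem.Chars.rstrip, PySem.Chars.lower]
  simp only [hds, ← List.map_reverse]

-- the normalisation `lower ∘ strip` that A applies twice is idempotent
theorem pv_norm_idem (s : String) :
    PySem.Str.lower (PySem.Str.strip (PySem.Str.lower (PySem.Str.strip s))) =
      PySem.Str.lower (PySem.Str.strip s) := by
  simp only [PySem.Str.lower, PySem.Str.strip, String.toList_ofList]
  rw [pv_strip_lower, pv_lower_idem, pv_strip_idem]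

-- lower of a string is empty iff the string is empty
theorem pv_lower_eq_empty (s : String) :
    (PySem.Str.lower s == "") = (s == "") := by
  rw [Bool.eq_iff_iff]
  simp only [beq_iff_eq]
  constructor
  · intro h
    have := congrArg String.toList h
    simp only [PySem.Str.lower, String.toList_ofList, PySem.Chars.lower] at this
    have : s.toList = [] := by
      cases hx : s.toList <;> simp [hx] at this ⊢
    have h2 : s.toList = ("" : String).toList := by simpa using this
    exact String.toList_inj.mp h2
  · intro h; subst h; rfl

-- the Set build keeps all elements iff the list has no duplicates
theorem pv_ofList_length_eq_iff (xs : List Int) :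
    (PySem.Set.ofList xs).length = xs.length ↔ xs.Nodup := by
  constructor
  · intro h
    have hsub : PySem.Set.ofList xs ⊆ xs := fun x hx => (PySem.Set.mem_ofList xs x).mp hx
    have hperm := ((PySem.Set.nodup_ofList xs).subperm hsub).perm_of_length_le (le_of_eq h.symm)
    exact hperm.nodup_iff.mp (PySem.Set.nodup_ofList xs)
  · intro h
    rw [PySem.Set.ofList_eq_self_of_nodup xs h]

-- filterMap id keeps the length when no entry is none
theorem pv_len_filterMap (idxs : List (Option Int)) (h : idxs.all (fun o => o.isSome)) :
    (idxs.filterMap id).length = idxs.length := by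
  induction idxs with
  | nil => rfl
  | cons o rest ih =>
    simp only [List.all_cons, Bool.and_eq_true] at h
    cases o with
    | none => simp at h
    | some v =>
      rw [show List.filterMap id (some v :: rest) = v :: List.filterMap id rest from rfl]
      simp only [List.length_cons, ih h.2]

-- characterisation of B's loop in terms of A's scans
theorem pv_altLoop_spec (items : List String) (seen : PySem.Set Int) (acc : List Int) :
    pvAltLoop items seen acc =
      (let idxs := ((items.filter (fun i => !(PySem.Str.strip i == ""))).map
          (fun i => WEEKDAY_MAP.get? (PySem.Str.lower (PySem.Str.strip i))));
       if idxs.any (fun o => o.isNone) then none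
       else
         let vals := idxs.filterMap id
         if vals.Nodup ∧ ∀ v ∈ vals, v ∉ seen then some (acc ++ vals) else none) := by
  induction items generalizing seen acc with
  | nil =>
    show some acc = _
    simp only [List.filter_nil, List.map_nil, List.any_nil, Bool.false_eq_true, if_false,
      List.filterMap_nil]
    rw [if_pos ⟨List.nodup_nil, fun v hv => absurd hv List.not_mem_nil⟩, List.append_nil]
  | cons ITEM rest ih =>
    by_cases hb : (PySem.Str.strip ITEM == "") = true
    · have hk : (PySem.Str.lower (PySem.Str.strip ITEM) == "") = true := by
        rw [pv_lower_eq_empty]; exact hb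
      simp only [pvAltLoop, hk, if_true, List.filter_cons, hb, Bool.not_true, ih,
        Bool.false_eq_true, if_false]
    · have hk : (PySem.Str.lower (PySem.Str.strip ITEM) == "") = false := by
        rw [pv_lower_eq_empty]; simpa using hb
      simp only [pvAltLoop, hk, Bool.false_eq_true, if_false, List.filter_cons, hb, Bool.not_false,
        if_true, List.map_cons]
      cases hg : WEEKDAY_MAP.get? (PySem.Str.lower (PySem.Str.strip ITEM)) with
      | none => simp
      | some IDX =>
        by_cases hs : PySem.Set.contains seen IDX = true
        · have hmem : IDX ∈ seen := List.contains_iff_mem.mp hs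
          simp only [hs, if_true]
          by_cases ha : ((rest.filter (fun i => !(PySem.Str.strip i == ""))).map
              (fun i => WEEKDAY_MAP.get? (PySem.Str.lower (PySem.Str.strip i)))).any (fun o => o.isNone) = true
          · simp only [List.any_cons, Option.isNone_some, Bool.false_or, ha, if_true]
          · simp only [List.any_cons, Option.isNone_some, Bool.false_or, ha,
              Bool.false_eq_true, if_false, List.filterMap_cons]
            rw [show (id (some IDX) : Option Int) = some IDX from rfl]
            rw [if_neg]
            rintro ⟨-, hall⟩
            exact hall IDX List.mem_cons_self hmem
        · have hmem : IDX ∉ seen := fun hm => hs (List.contains_iff_mem.mpr hm)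
          simp only [hs, Bool.false_eq_true, if_false, ih]
          by_cases ha : ((rest.filter (fun i => !(PySem.Str.strip i == ""))).map
              (fun i => WEEKDAY_MAP.get? (PySem.Str.lower (PySem.Str.strip i)))).any (fun o => o.isNone) = true
          · simp only [List.any_cons, Option.isNone_some, Bool.false_or, ha, if_true]
          · simp only [List.any_cons, Option.isNone_some, Bool.false_or, ha,
              Bool.false_eq_true, if_false, List.filterMap_cons]
            rw [show (id (some IDX) : Option Int) = some IDX from rfl]
            have hcond : ((((rest.filter (fun i => !(PySem.Str.strip i == ""))).map
                  (fun i => WEEKDAY_MAP.get? (PySem.Str.lower (PySem.Str.strip i)))).filterMap id).Nodup ∧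
                ∀ v ∈ ((rest.filter (fun i => !(PySem.Str.strip i == ""))).map
                  (fun i => WEEKDAY_MAP.get? (PySem.Str.lower (PySem.Str.strip i)))).filterMap id,
                  v ∉ PySem.Set.add seen IDX) ↔
                ((IDX :: (((rest.filter (fun i => !(PySem.Str.strip i == ""))).map
                  (fun i => WEEKDAY_MAP.get? (PySem.Str.lower (PySem.Str.strip i)))).filterMap id)).Nodup ∧
                ∀ v ∈ IDX :: (((rest.filter (fun i => !(PySem.Str.strip i == ""))).map
                  (fun i => WEEKDAY_MAP.get? (PySem.Str.lower (PySem.Str.strip i)))).filterMap id),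
                  v ∉ seen) := by
              constructor
              · rintro ⟨hnd, hsn⟩
                refine ⟨List.nodup_cons.mpr ⟨fun hm => ?_, hnd⟩, ?_⟩
                · exact (hsn IDX hm) ((PySem.Set.mem_add seen IDX IDX).mpr (Or.inr rfl))
                · intro v hv
                  rcases List.mem_cons.mp hv with h | h
                  · subst h; exact hmem
                  · intro hvs
                    exact hsn v h ((PySem.Set.mem_add seen IDX v).mpr (Or.inl hvs))
              · rintro ⟨hnd, hsn⟩
                have hnd' := List.nodup_cons.mp hnd
                refine ⟨hnd'.2, ?_⟩
                intro v hv hvadd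
                rcases (PySem.Set.mem_add seen IDX v).mp hvadd with h | h
                · exact hsn v (List.mem_cons_of_mem _ hv) h
                · subst h; exact hnd'.1 hv
            rw [if_congr hcond rfl rfl]
            split_ifs with h
            · simp only [List.append_assoc, List.cons_append, List.nil_append]
            · rfl

-- ===== VERDICT (by name: the statement is the Claim_ definition above) =====
theorem parse_weekday_list_spec : Claim_equal_parse_weekday_list := by
  intro VALUE EXPECTED_COUNT _
  unfold Spec_parse_weekday_list parse_weekday_list parse_weekday_list_alt
  rw [pv_altLoop_spec]
  dsimp only
  set items := (PySem.Str.split? VALUE ",").getD [] with hitems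
  set F := items.filter (fun i => !(PySem.Str.strip i == "")) with hF
  set idxs := F.map (fun i => WEEKDAY_MAP.get? (PySem.Str.lower (PySem.Str.strip i))) with hidxs
  set vals := idxs.filterMap id with hvals
  have hmm : (F.map (fun ITEM => PySem.Str.lower (PySem.Str.strip ITEM))).map parse_weekday = idxs := by
    rw [List.map_map, hidxs]
    apply List.map_congr_left
    intro i _
    unfold parse_weekday
    simp only [Function.comp_apply]
    rw [pv_norm_idem]
  rw [hmm]
  have hlenP : (F.map (fun ITEM => PySem.Str.lower (PySem.Str.strip ITEM))).length = F.length :=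
    List.length_map ..
  have hleni : idxs.length = F.length := by rw [hidxs]; exact List.length_map ..
  by_cases hany : (idxs.any fun o => o.isNone) = true
  · simp only [hany, if_true]
    split_ifs <;> rfl
  · have hany' : (idxs.any fun o => o.isNone) = false := Bool.eq_false_iff.mpr hany
    have hall : (idxs.all fun o => o.isSome) = true := by
      rw [List.all_eq_true]
      intro o ho
      cases o with
      | none => exact absurd (List.any_eq_true.mpr ⟨none, ho, rfl⟩) hany
      | some v => rfl
    have hlenv : vals.length = F.length := by rw [hvals, pv_len_filterMap idxs hall, hleni]
    simp only [hany', Bool.false_eq_true, if_false]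
    by_cases hnd : vals.Nodup
    · have hcond : vals.Nodup ∧ ∀ v ∈ vals, v ∉ PySem.Set.empty :=
        ⟨hnd, fun v _ hv => absurd hv List.not_mem_nil⟩
      rw [if_pos hcond, List.nil_append]
      dsimp only
      have hset : (PySem.Set.ofList vals).length = vals.length :=
        (pv_ofList_length_eq_iff vals).mpr hnd
      by_cases hc : (F.length : Int) = EXPECTED_COUNT
      · rw [if_neg (by rw [hlenP]; omega)]
        rw [if_neg (by rw [hset, hlenv]; omega)]
        have hbe : ((vals.length : Int) == EXPECTED_COUNT) = true := by
          rw [beq_iff_eq, hlenv]; exact hc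
        rw [hbe, if_pos rfl]
      · rw [if_pos (by rw [hlenP]; omega)]
        have hbe : ((vals.length : Int) == EXPECTED_COUNT) = false := by
          rw [beq_eq_false_iff_ne, hlenv]; exact fun h => hc h
        rw [hbe]
        rfl
    · have hcond : ¬ (vals.Nodup ∧ ∀ v ∈ vals, v ∉ PySem.Set.empty) := fun h => hnd h.1
      rw [if_neg hcond]
      by_cases hc : (F.length : Int) = EXPECTED_COUNT
      · rw [if_neg (by rw [hlenP]; omega)]
        have hset : (PySem.Set.ofList vals).length ≠ vals.length :=
          fun h => hnd ((pv_ofList_length_eq_iff vals).mp h)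
        rw [if_pos (by rw [← hvals]; rw [hlenv] at hset; have := PySem.Set.length_ofList_le vals; omega)]
      · rw [if_pos (by rw [hlenP]; omega)]
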